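-- pv_equiv track=rewrite | github.com/oodaooda/watchTower | app/routers/qa.py | _requested_metric_fields
-- ===== SOURCE A (Python) =====
-- from typing import Any, Dict, Optional, Tuple, List
--
-- def _requested_metric_fields(question: str) -> List[str]:
--     q = (question or "").lower()
--     fields: List[str] = []
--     if any(k in q for k in ["last close", "close price", "share price", "stock price", "price"]):
--         fields.append("close_price")
--     if any(k in q for k in ["p/e", "pe ratio", "price to earnings", "valuation"]):
--         fields.append("pe_ttm")
--     if "revenue" in q:
--         fields.append("revenue")
--     if any(k in q for k in ["net income", "earnings", "profit"]):
--         fields.append("net_income")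
--     if "eps" in q:
--         fields.append("eps")
--     # Preserve order and uniqueness.
--     out: List[str] = []
--     for f in fields:
--         if f not in out:
--             out.append(f)
--     return out
-- ===== SOURCE B (Python) =====
-- from typing import List
--
-- _KEYWORD_TO_FIELD = [
--     ("last close", "close_price"), ("close price", "close_price"),
--     ("share price", "close_price"), ("stock price", "close_price"),
--     ("price", "close_price"),
--     ("p/e", "pe_ttm"), ("pe ratio", "pe_ttm"),
--     ("price to earnings", "pe_ttm"), ("valuation", "pe_ttm"),
--     ("revenue", "revenue"),
--     ("net income", "net_income"), ("earnings", "net_income"),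
--     ("profit", "net_income"),
--     ("eps", "eps"),
-- ]
-- _FIELD_ORDER = ["close_price", "pe_ttm", "revenue", "net_income", "eps"]
--
-- def _requested_metric_fields(question: str) -> List[str]:
--     # Single left-to-right scan of the text: at each suffix, record every
--     # keyword that starts there; then emit the matched fields in canonical order.
--     q = (question or "").lower()
--     found = set()
--     suffix = q
--     while suffix:
--         for kw, field in _KEYWORD_TO_FIELD:
--             if suffix.startswith(kw):
--                 found.add(field)
--         suffix = suffix[1:]
--     return [f for f in _FIELD_ORDER if f in found]
-- ===== Notes on version B (the rewrite author's own statement) =====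
-- stated objective: alternative
-- what changed: Replaces A's keyword-driven substring searches (five if/any branches plus a dedup loop) with a single left-to-right scan of the text that records, at each suffix, every keyword starting there into a set keyed by a keyword->field table, then emits matched fields in canonical order.
import Mathlib
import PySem

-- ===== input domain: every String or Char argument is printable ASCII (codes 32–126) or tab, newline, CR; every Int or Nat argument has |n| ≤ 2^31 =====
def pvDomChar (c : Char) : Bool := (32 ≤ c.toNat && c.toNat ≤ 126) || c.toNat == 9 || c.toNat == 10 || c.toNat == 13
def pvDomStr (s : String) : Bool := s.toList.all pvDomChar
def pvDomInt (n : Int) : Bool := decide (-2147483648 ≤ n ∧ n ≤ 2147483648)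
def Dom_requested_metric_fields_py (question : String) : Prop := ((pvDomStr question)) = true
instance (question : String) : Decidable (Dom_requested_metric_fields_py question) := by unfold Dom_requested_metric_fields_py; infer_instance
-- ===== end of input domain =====

-- B replaces A's keyword-driven substring searches (five if/any branches + dedup
-- loop) by one left-to-right scan of the text recording matched keywords via a
-- keyword->field table into a set, then emits fields in canonical order (alternative).

-- ===== PORT A =====
def requested_metric_fields_py (question : String) : List String :=
  let q := PySem.Str.lower (if question == "" then "" else question)
  let fields : List String := []
  let fields := if (["last close", "close price", "share price", "stock price", "price"].any
      (fun k => PySem.Str.isIn k q)) then fields ++ ["close_price"] else fields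
  let fields := if (["p/e", "pe ratio", "price to earnings", "valuation"].any
      (fun k => PySem.Str.isIn k q)) then fields ++ ["pe_ttm"] else fields
  let fields := if PySem.Str.isIn "revenue" q then fields ++ ["revenue"] else fields
  let fields := if (["net income", "earnings", "profit"].any
      (fun k => PySem.Str.isIn k q)) then fields ++ ["net_income"] else fields
  let fields := if PySem.Str.isIn "eps" q then fields ++ ["eps"] else fields
  -- dedup loop: for f in fields: if f not in out: out.append(f)
  fields.foldl (fun out f => if out.contains f then out else out ++ [f]) []

-- ===== PORT B =====
def pvKeywordToField : List (String × String) :=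
  [("last close", "close_price"), ("close price", "close_price"),
   ("share price", "close_price"), ("stock price", "close_price"),
   ("price", "close_price"),
   ("p/e", "pe_ttm"), ("pe ratio", "pe_ttm"),
   ("price to earnings", "pe_ttm"), ("valuation", "pe_ttm"),
   ("revenue", "revenue"),
   ("net income", "net_income"), ("earnings", "net_income"),
   ("profit", "net_income"),
   ("eps", "eps")]

def pvFieldOrder : List String := ["close_price", "pe_ttm", "revenue", "net_income", "eps"]

-- 'while suffix: … suffix = suffix[1:]' — structural scan over the text's suffixes
def pvScan : List Char → PySem.Set String → PySem.Set String
  | [], found => found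
  | c :: rest, found =>
      let found := pvKeywordToField.foldl
        (fun fd p => if PySem.Chars.startswith (c :: rest) p.1.toList
                     then PySem.Set.add fd p.2 else fd) found
      pvScan rest found

def requested_metric_fields_py_alt (question : String) : List String :=
  let q := PySem.Str.lower (if question == "" then "" else question)
  let found := pvScan q.toList PySem.Set.empty
  pvFieldOrder.filter (fun f => PySem.Set.contains found f)

-- ===== PRECONDITION & SPEC =====
def Spec_requested_metric_fields_py (question : String) (out : List String) : Prop := out = requested_metric_fields_py_alt question
instance (question : String) (out : List String) : Decidable (Spec_requested_metric_fields_py question out) := by unfold Spec_requested_metric_fields_py; infer_instance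

-- ===== CLAIM (what is proved, stated in full; the proofs are below) =====
def Claim_equal_requested_metric_fields_py : Prop := ∀ (question : String), Dom_requested_metric_fields_py question → Spec_requested_metric_fields_py question (requested_metric_fields_py question)

-- ===== LEMMAS AND PROOFS =====

-- membership after one table pass with a generic per-entry condition
lemma mem_fold_if (l : List (String × String)) (cond : String × String → Bool)
    (fd : PySem.Set String) (f : String) :
    f ∈ l.foldl (fun fd p => if cond p then PySem.Set.add fd p.2 else fd) fd ↔
      f ∈ fd ∨ ∃ p ∈ l, cond p = true ∧ p.2 = f := by
  induction l generalizing fd with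
  | nil => simp
  | cons a t ih =>
      simp only [List.foldl_cons]
      rw [ih]
      by_cases h : cond a = true
      · simp [h, PySem.Set.mem_add]
        try tauto
      · simp [h]
        try tauto

-- membership after the whole scan = some keyword of the field is an infix of the text
lemma mem_pvScan (s : List Char) (fd : PySem.Set String) (f : String) :
    f ∈ pvScan s fd ↔ f ∈ fd ∨ ∃ p ∈ pvKeywordToField, p.2 = f ∧ p.1.toList <:+: s := by
  induction s generalizing fd with
  | nil =>
      have hne : ∀ p ∈ pvKeywordToField, p.1.toList ≠ ([] : List Char) := by decide
      simp only [pvScan, List.infix_nil]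
      constructor
      · exact Or.inl
      · rintro (h | ⟨p, hp, _, hnil⟩)
        · exact h
        · exact absurd hnil (hne p hp)
  | cons c rest ih =>
      show f ∈ pvScan rest _ ↔ _
      rw [ih, mem_fold_if]
      simp only [PySem.Chars.startswith_iff, List.infix_cons_iff]
      constructor
      · rintro (⟨h | ⟨p, hp, hpre, hf⟩⟩ | ⟨p, hp, hf, hinf⟩)
        · exact Or.inl h
        · exact Or.inr ⟨p, hp, hf, Or.inl hpre⟩
        · exact Or.inr ⟨p, hp, hf, Or.inr hinf⟩
      · rintro (h | ⟨p, hp, hf, hpre | hinf⟩)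
        · exact Or.inl (Or.inl h)
        · exact Or.inl (Or.inr ⟨p, hp, hpre, hf⟩)
        · exact Or.inr ⟨p, hp, hf, hinf⟩

-- ===== VERDICT (by name: the statement is the Claim_ definition above) =====
set_option maxRecDepth 8000 in
theorem requested_metric_fields_py_spec : Claim_equal_requested_metric_fields_py := by
  intro question _
  unfold Spec_requested_metric_fields_py requested_metric_fields_py requested_metric_fields_py_alt
  set q := PySem.Str.lower (if question == "" then "" else question) with hq
  have hmem : ∀ f : String, f ∈ pvScan q.toList PySem.Set.empty ↔
      ∃ p ∈ pvKeywordToField, p.2 = f ∧ p.1.toList <:+: q.toList := by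
    intro f
    rw [mem_pvScan]
    simp [PySem.Set.empty]
  have e1 : PySem.Set.contains (pvScan q.toList PySem.Set.empty) "close_price"
      = (["last close", "close price", "share price", "stock price", "price"].any
          (fun k => PySem.Str.isIn k q)) := by
    rw [Bool.eq_iff_iff, PySem.Set.contains_iff, hmem]
    simp [pvKeywordToField, PySem.Chars.isIn_iff_infix]
  have e2 : PySem.Set.contains (pvScan q.toList PySem.Set.empty) "pe_ttm"
      = (["p/e", "pe ratio", "price to earnings", "valuation"].any
          (fun k => PySem.Str.isIn k q)) := by
    rw [Bool.eq_iff_iff, PySem.Set.contains_iff, hmem]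
    simp [pvKeywordToField, PySem.Chars.isIn_iff_infix]
  have e3 : PySem.Set.contains (pvScan q.toList PySem.Set.empty) "revenue"
      = PySem.Str.isIn "revenue" q := by
    rw [Bool.eq_iff_iff, PySem.Set.contains_iff, hmem]
    simp [pvKeywordToField, PySem.Chars.isIn_iff_infix]
  have e4 : PySem.Set.contains (pvScan q.toList PySem.Set.empty) "net_income"
      = (["net income", "earnings", "profit"].any (fun k => PySem.Str.isIn k q)) := by
    rw [Bool.eq_iff_iff, PySem.Set.contains_iff, hmem]
    simp [pvKeywordToField, PySem.Chars.isIn_iff_infix]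
  have e5 : PySem.Set.contains (pvScan q.toList PySem.Set.empty) "eps"
      = PySem.Str.isIn "eps" q := by
    rw [Bool.eq_iff_iff, PySem.Set.contains_iff, hmem]
    simp [pvKeywordToField, PySem.Chars.isIn_iff_infix]
  simp only [pvFieldOrder, List.filter, e1, e2, e3, e4, e5]
  cases h1 : (["last close", "close price", "share price", "stock price", "price"].any
      (fun k => PySem.Str.isIn k q)) <;>
  cases h2 : (["p/e", "pe ratio", "price to earnings", "valuation"].any
      (fun k => PySem.Str.isIn k q)) <;>
  cases h3 : PySem.Str.isIn "revenue" q <;>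
  cases h4 : (["net income", "earnings", "profit"].any
      (fun k => PySem.Str.isIn k q)) <;>
  cases h5 : PySem.Str.isIn "eps" q <;>
    rfl
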